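-- pv_equiv track=rewrite | github.com/123sherlocklee/Generative-BiLSTM | train.py | create_char_mapping
-- ===== SOURCE A (Python) =====
-- def create_char_mapping(domains):
--     char2idx = dict()
--     idx2char = dict()
--     idx =0
--     for char in domains:
--         if char not in char2idx.keys():
--             char2idx[char] = idx
--             idx2char[idx] = char
--             idx += 1
--     return char2idx, idx2char
-- ===== SOURCE B (Python) =====
-- def create_char_mapping(domains):
--     # Rank-by-first-occurrence: collect the distinct characters as a set,
--     # then SORT them by the position of their first occurrence; the index of a
--     # character is its rank in that order (A instead threads a running counter
--     # through one interleaved pass).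
--     uniq = sorted(set(domains), key=domains.index)
--     char2idx = {c: i for i, c in enumerate(uniq)}
--     idx2char = {i: c for i, c in enumerate(uniq)}
--     return char2idx, idx2char
-- ===== Notes on version B (the rewrite author's own statement) =====
-- stated objective: alternative
-- what changed: Replaces the single interleaved pass with a running counter by a rank-by-first-occurrence algorithm: the distinct characters are collected as a set, sorted by the index of their first occurrence, and each character's mapping index is its rank in that sorted order.
import Mathlib
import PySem

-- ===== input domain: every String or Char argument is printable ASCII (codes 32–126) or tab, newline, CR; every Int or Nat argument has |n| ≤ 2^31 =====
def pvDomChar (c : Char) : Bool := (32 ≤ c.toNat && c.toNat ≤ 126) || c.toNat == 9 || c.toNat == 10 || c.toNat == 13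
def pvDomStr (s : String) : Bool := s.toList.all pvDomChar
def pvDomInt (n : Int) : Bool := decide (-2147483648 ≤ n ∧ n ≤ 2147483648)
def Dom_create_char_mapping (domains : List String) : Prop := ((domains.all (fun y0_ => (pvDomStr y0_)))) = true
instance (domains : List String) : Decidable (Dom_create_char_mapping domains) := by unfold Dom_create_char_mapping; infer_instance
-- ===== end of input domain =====

-- B ranks each distinct character by sorting the set of characters on the position of its
-- first occurrence, instead of A's single interleaved pass with a running counter; same result, no speed claim.

-- ===== PORT A =====
-- the loop body: if char not in char2idx: char2idx[char]=idx; idx2char[idx]=char; idx+=1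
def createCharStep (st : PySem.Dict String Int × PySem.Dict Int String × Int) (ch : String) :
    PySem.Dict String Int × PySem.Dict Int String × Int :=
  if st.1.contains ch then st
  else (st.1.insert ch st.2.2, st.2.1.insert st.2.2 ch, st.2.2 + 1)

def create_char_mapping (domains : List String) : (List (String × Int)) × (List (Int × String)) :=
  let st := domains.foldl createCharStep (PySem.Dict.empty, PySem.Dict.empty, 0)
  (st.1.items, st.2.1.items)

-- ===== PORT B =====
def create_char_mapping_alt (domains : List String) : (List (String × Int)) × (List (Int × String)) :=
  -- uniq = sorted(set(domains), key=domains.index); every element of the set occurs in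
  -- domains, so domains.index never raises: index? is always some, .getD 0 is exact here
  let uniq := PySem.List.sorted (PySem.Set.ofList domains)
      (fun c => (PySem.List.index? domains c).getD 0) false
  let e := PySem.List.enumerate uniq 0
  (e.map (fun p => (p.2, p.1)), e)

-- ===== PRECONDITION & SPEC =====
def Spec_create_char_mapping (domains : List String) (out : (List (String × Int)) × (List (Int × String))) : Prop := out = create_char_mapping_alt domains
instance (domains : List String) (out : (List (String × Int)) × (List (Int × String))) : Decidable (Spec_create_char_mapping domains out) := by unfold Spec_create_char_mapping; infer_instance

-- ===== CLAIM (what is proved, stated in full; the proofs are below) =====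
def Claim_equal_create_char_mapping : Prop := ∀ (domains : List String), Dom_create_char_mapping domains → Spec_create_char_mapping domains (create_char_mapping domains)

-- ===== LEMMAS AND PROOFS =====

-- the A-loop state reached after consuming the unique-so-far list u
def mkC (u : List String) : PySem.Dict String Int :=
  PySem.Dict.mk ((PySem.List.enumerate u 0).map (fun p => (p.2, p.1)))
def mkI (u : List String) : PySem.Dict Int String :=
  PySem.Dict.mk (PySem.List.enumerate u 0)

lemma contains_mkC (u : List String) (c : String) : (mkC u).contains c = decide (c ∈ u) := by
  rw [PySem.Dict.contains_eq_decide_mem_keys]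
  have : (mkC u).keys = u := by
    simp [mkC, PySem.Dict.keys_mk, List.map_map]
    exact PySem.List.map_snd_enumerate u 0
  rw [this]

lemma mkC_insert (u : List String) (c : String) (h : c ∉ u) :
    (mkC u).insert c (u.length : Int) = mkC (u ++ [c]) := by
  apply PySem.Dict.ext
  rw [PySem.Dict.items_insert_of_not_contains]
  · simp [mkC, PySem.List.enumerate_append, PySem.List.enumerate_cons, PySem.List.enumerate_nil]
  · simp [contains_mkC, h]

lemma mkI_insert (u : List String) (c : String) :
    (mkI u).insert (u.length : Int) c = mkI (u ++ [c]) := by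
  apply PySem.Dict.ext
  rw [PySem.Dict.items_insert_of_not_contains]
  · simp [mkI, PySem.List.enumerate_append, PySem.List.enumerate_cons, PySem.List.enumerate_nil]
  · rw [PySem.Dict.contains_eq_decide_mem_keys]
    have hk : (mkI u).keys = PySem.List.pyRange 0 (u.length : Int) 1 := by
      simpa [mkI, PySem.Dict.keys_mk] using PySem.List.map_fst_enumerate u 0
    rw [hk]
    simp [PySem.List.mem_pyRange_one]

lemma loopA (rest : List String) : ∀ (u : List String),
    rest.foldl createCharStep (mkC u, mkI u, (u.length : Int))
      = (mkC (rest.foldl PySem.Set.add u), mkI (rest.foldl PySem.Set.add u),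
         ((rest.foldl PySem.Set.add u).length : Int)) := by
  induction rest with
  | nil => intro u; simp
  | cons c rest ih =>
    intro u
    by_cases h : c ∈ u
    · have hstep : createCharStep (mkC u, mkI u, (u.length : Int)) c = (mkC u, mkI u, (u.length : Int)) := by
        simp [createCharStep, contains_mkC, h]
      have hadd : PySem.Set.add u c = u := by simp [PySem.Set.add, PySem.Set.contains, h]
      simp only [List.foldl_cons, hstep, hadd, ih]
    · have hstep : createCharStep (mkC u, mkI u, (u.length : Int)) c
          = (mkC (u ++ [c]), mkI (u ++ [c]), ((u ++ [c]).length : Int)) := by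
        simp only [createCharStep, contains_mkC, h, decide_false, Bool.false_eq_true, if_false]
        rw [mkC_insert u c h, mkI_insert u c]
        simp
      have hadd : PySem.Set.add u c = u ++ [c] := by simp [PySem.Set.add, PySem.Set.contains, h]
      simp only [List.foldl_cons, hstep, hadd, ih]

-- first-occurrence indices strictly increase along the set-builder fold
lemma foldl_add_pairwise_idx (s : List String) : ∀ (p u L : List String),
    L = p ++ s →
    (∀ a, a ∈ u ↔ a ∈ p) →
    (∀ a ∈ u, ∃ i, PySem.List.index? L a = some i ∧ i < p.length) →
    u.Pairwise (fun a b => (PySem.List.index? L a).getD 0 < (PySem.List.index? L b).getD 0) →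
    (s.foldl PySem.Set.add u).Pairwise
      (fun a b => (PySem.List.index? L a).getD 0 < (PySem.List.index? L b).getD 0) := by
  induction s with
  | nil => intro p u L _ _ _ hpw; simpa using hpw
  | cons b s ih =>
    intro p u L hL hmem hidx hpw
    by_cases hb : b ∈ u
    · have hadd : PySem.Set.add u b = u := by simp [PySem.Set.add, PySem.Set.contains, hb]
      simp only [List.foldl_cons, hadd]
      refine ih (p ++ [b]) u L (by simp [hL]) ?_ ?_ hpw
      · intro a
        constructor
        · intro ha; exact List.mem_append_left _ ((hmem a).mp ha)
        · intro ha
          rcases List.mem_append.mp ha with h | h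
          · exact (hmem a).mpr h
          · simp at h; subst h; exact hb
      · intro a ha
        obtain ⟨i, hi, hlt⟩ := hidx a ha
        exact ⟨i, hi, by simp; omega⟩
    · have hbp : b ∉ p := fun h => hb ((hmem b).mpr h)
      have hbidx : PySem.List.index? L b = some p.length := by
        rw [PySem.List.index?_eq_some_iff]
        exact ⟨p, s, hL, rfl, hbp⟩
      have hadd : PySem.Set.add u b = u ++ [b] := by simp [PySem.Set.add, PySem.Set.contains, hb]
      simp only [List.foldl_cons, hadd]
      refine ih (p ++ [b]) (u ++ [b]) L (by simp [hL]) ?_ ?_ ?_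
      · intro a
        simp only [List.mem_append, List.mem_singleton]
        exact or_congr_left (hmem a)
      · intro a ha
        rcases List.mem_append.mp ha with h | h
        · obtain ⟨i, hi, hlt⟩ := hidx a h
          exact ⟨i, hi, by simp; omega⟩
        · simp at h; subst h
          exact ⟨p.length, hbidx, by simp⟩
      · rw [List.pairwise_append]
        refine ⟨hpw, by simp, ?_⟩
        intro a ha b' hb'
        simp at hb'; subst hb'
        obtain ⟨i, hi, hlt⟩ := hidx a ha
        rw [hi, hbidx]
        simpa using hlt

-- sorting the set of elements by first-occurrence index gives the first-occurrence dedup order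
lemma sorted_ofList_idx_eq_dedup (L : List String) :
    PySem.List.sorted (PySem.Set.ofList L)
      (fun c => (PySem.List.index? L c).getD 0) false = PySem.List.dedup L := by
  apply PySem.List.sorted_eq_of_perm_of_pairwise_lt
  · rw [PySem.List.dedup_eq_ofList]
  · rw [PySem.List.dedup_eq_ofList, PySem.Set.ofList_eq_foldl]
    exact foldl_add_pairwise_idx L [] [] L rfl (by simp) (by simp) (by simp)

-- ===== VERDICT (by name: the statement is the Claim_ definition above) =====
theorem create_char_mapping_spec : Claim_equal_create_char_mapping := by
  intro domains _
  unfold Spec_create_char_mapping create_char_mapping create_char_mapping_alt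
  have h0 : (PySem.Dict.empty, PySem.Dict.empty, (0 : Int))
      = (mkC [], mkI [], (([] : List String).length : Int)) := by
    simp [mkC, mkI, PySem.List.enumerate_nil, PySem.Dict.empty]
  rw [h0, loopA domains []]
  have hfold : domains.foldl PySem.Set.add [] = PySem.List.dedup domains := by
    rw [PySem.List.dedup_eq_ofList, PySem.Set.ofList_eq_foldl]
  rw [sorted_ofList_idx_eq_dedup]
  simp [hfold, mkC, mkI]
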